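-- pv_equiv track=rewrite | github.com/brndngln/AIFOLIO_FINAL_V12 | autonomy/analytics.py | get_per_key_endpoint_breakdown
-- ===== SOURCE A (Python) =====
-- from typing import Dict, Any, List, Optional, Tuple, Callable, TypedDict, Union
--
-- class AuditEvent(TypedDict, total=False):
--     timestamp: Optional[str]
--     key: Optional[str]
--     action: Optional[str]
--     endpoint: Optional[str]
--     status: Optional[str]
--     latency: Optional[float]
--
-- def get_per_key_endpoint_breakdown(
--     events: List[AuditEvent], key_roles: Dict[str, str]
-- ) -> Dict[str, Dict[str, int]]:
--     result: Dict[str, Dict[str, int]] = {}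
--     for e in events:
--         k = e.get("key", None)
--         ep = e.get("endpoint", None)
--         if k and ep:
--             if k not in result:
--                 result[k] = {}
--             result[k][ep] = result[k].get(ep, 0) + 1
--     return result
-- ===== SOURCE B (Python) =====
-- def get_per_key_endpoint_breakdown(events, key_roles):
--     # Stage 1: flatten events to the validated (key, endpoint) pair list.
--     pairs = [(e.get("key"), e.get("endpoint")) for e in events]
--     pairs = [(k, ep) for k, ep in pairs if k and ep]
--     # Stage 2: rebuild the table from the pair list alone — first-seen key
--     # order, first-seen endpoint order per key, counts by pairs.count.
--     return {
--         k: {ep: pairs.count((k, ep))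
--             for ep in dict.fromkeys(ep2 for k2, ep2 in pairs if k2 == k)}
--         for k in dict.fromkeys(k for k, _ in pairs)
--     }
-- ===== Notes on version B (the rewrite author's own statement) =====
-- stated objective: alternative
-- what changed: Replaces A's single interleaved nested-dict increment loop by a stateless two-stage shape: flatten events to a validated (key, endpoint) pair list, then rebuild the whole table by comprehensions over first-seen-deduplicated keys/endpoints with pairs.count((k, ep)) as the count.
import Mathlib
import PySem

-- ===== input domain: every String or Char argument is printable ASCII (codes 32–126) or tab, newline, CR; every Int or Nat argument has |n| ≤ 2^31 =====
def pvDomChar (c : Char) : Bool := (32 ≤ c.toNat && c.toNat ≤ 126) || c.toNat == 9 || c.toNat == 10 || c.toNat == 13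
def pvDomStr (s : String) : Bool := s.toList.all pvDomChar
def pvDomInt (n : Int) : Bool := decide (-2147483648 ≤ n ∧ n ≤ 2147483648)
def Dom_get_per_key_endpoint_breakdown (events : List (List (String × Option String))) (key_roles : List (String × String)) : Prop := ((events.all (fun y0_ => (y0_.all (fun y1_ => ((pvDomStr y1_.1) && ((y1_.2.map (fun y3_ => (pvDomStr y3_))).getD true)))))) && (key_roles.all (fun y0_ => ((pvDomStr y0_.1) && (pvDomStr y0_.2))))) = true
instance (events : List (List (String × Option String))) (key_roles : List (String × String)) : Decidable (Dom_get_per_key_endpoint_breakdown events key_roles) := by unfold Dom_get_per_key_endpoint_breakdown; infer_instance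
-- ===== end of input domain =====

-- B replaces A's interleaved nested-dict increment loop by a stateless two-stage shape: flatten to a
-- validated (key, endpoint) pair list, then rebuild the table by comprehensions over deduplicated
-- keys/endpoints with pairs.count (alternative decomposition; same return value).

-- ===== PORT A =====
def get_per_key_endpoint_breakdown (events : List (List (String × Option String))) (key_roles : List (String × String)) : List (String × List (String × Int)) :=
  let result : PySem.Dict String (PySem.Dict String Int) :=
    events.foldl (fun result e =>
      let k : Option String := ((PySem.Dict.mk e).get? "key").getD none
      let ep : Option String := ((PySem.Dict.mk e).get? "endpoint").getD none
      match k, ep with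
      | some ks, some eps =>
        if ks ≠ "" ∧ eps ≠ "" then
          let result := if result.contains ks then result else result.insert ks PySem.Dict.empty
          result.insert ks ((result.getD ks PySem.Dict.empty).insert eps
            ((result.getD ks PySem.Dict.empty).getD eps 0 + 1))
        else result
      | _, _ => result) PySem.Dict.empty
  result.items.map (fun p => (p.1, p.2.items))

-- ===== PORT B =====
-- The two dict comprehensions of Source B range over dict.fromkeys-deduplicated keys (PySem.List.dedup),
-- which are distinct, so each comprehension's dict is exactly the list of its (key, value) pairs.
def get_per_key_endpoint_breakdown_alt (events : List (List (String × Option String))) (key_roles : List (String × String)) : List (String × List (String × Int)) :=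
  let pairs0 : List (Option String × Option String) :=
    events.map (fun e => (((PySem.Dict.mk e).get? "key").getD none, ((PySem.Dict.mk e).get? "endpoint").getD none))
  let pairs : List (String × String) :=
    pairs0.filterMap (fun p => match p.1 with
      | some k => match p.2 with
        | some ep => if k ≠ "" ∧ ep ≠ "" then some (k, ep) else none
        | none => none
      | none => none)
  (PySem.List.dedup (pairs.map (·.1))).map (fun k =>
    (k, (PySem.List.dedup ((pairs.filter (fun p => p.1 == k)).map (·.2))).map
          (fun ep => (ep, (pairs.count (k, ep) : Int)))))

-- ===== PRECONDITION & SPEC =====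
def Spec_get_per_key_endpoint_breakdown (events : List (List (String × Option String))) (key_roles : List (String × String)) (out : List (String × List (String × Int))) : Prop := out = get_per_key_endpoint_breakdown_alt events key_roles
instance (events : List (List (String × Option String))) (key_roles : List (String × String)) (out : List (String × List (String × Int))) : Decidable (Spec_get_per_key_endpoint_breakdown events key_roles out) := by unfold Spec_get_per_key_endpoint_breakdown; infer_instance

-- ===== CLAIM (what is proved, stated in full; the proofs are below) =====
def Claim_equal_get_per_key_endpoint_breakdown : Prop := ∀ (events : List (List (String × Option String))) (key_roles : List (String × String)), Dom_get_per_key_endpoint_breakdown events key_roles → Spec_get_per_key_endpoint_breakdown events key_roles (get_per_key_endpoint_breakdown events key_roles)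

-- ===== LEMMAS AND PROOFS =====

-- the (key, endpoint) pair an event contributes, if any
def pvExtract (e : List (String × Option String)) : Option (String × String) :=
  match ((PySem.Dict.mk e).get? "key").getD none, ((PySem.Dict.mk e).get? "endpoint").getD none with
  | some ks, some eps => if ks ≠ "" ∧ eps ≠ "" then some (ks, eps) else none
  | _, _ => none

-- A's loop step in normal form, over one extracted pair
def pvStepA (d : PySem.Dict String (PySem.Dict String Int)) (p : String × String) : PySem.Dict String (PySem.Dict String Int) :=
  d.insert p.1 ((d.getD p.1 PySem.Dict.empty).insert p.2 ((d.getD p.1 PySem.Dict.empty).getD p.2 0 + 1))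

-- fold over events = fold over extracted pairs
theorem pv_foldl_extract {σ : Type} (f : σ → String × String → σ) (events : List (List (String × Option String))) (init : σ) :
    events.foldl (fun d e => match pvExtract e with | some p => f d p | none => d) init
      = (events.filterMap pvExtract).foldl f init := by
  induction events generalizing init with
  | nil => rfl
  | cons e es ih =>
    simp only [List.foldl_cons, List.filterMap_cons]
    cases pvExtract e <;> simp [ih]

-- A's inline step equals the normal form pvStepA routed through pvExtract
theorem pv_stepA_match (d : PySem.Dict String (PySem.Dict String Int)) (e : List (String × Option String)) :
    (match ((PySem.Dict.mk e).get? "key").getD none, ((PySem.Dict.mk e).get? "endpoint").getD none with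
     | some ks, some eps =>
       if ks ≠ "" ∧ eps ≠ "" then
         let r := if d.contains ks then d else d.insert ks PySem.Dict.empty
         r.insert ks ((r.getD ks PySem.Dict.empty).insert eps ((r.getD ks PySem.Dict.empty).getD eps 0 + 1))
       else d
     | _, _ => d)
      = (match pvExtract e with | some p => pvStepA d p | none => d) := by
  unfold pvExtract
  cases ((PySem.Dict.mk e).get? "key").getD none with
  | none => rfl
  | some ks =>
    cases ((PySem.Dict.mk e).get? "endpoint").getD none with
    | none => rfl
    | some eps =>
      by_cases hc : ks ≠ "" ∧ eps ≠ ""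
      · simp only [if_pos hc]
        by_cases h : d.contains ks = true
        · simp [h, pvStepA]
        · simp only [Bool.not_eq_true] at h
          simp [h, pvStepA, PySem.Dict.getD_insert_self, PySem.Dict.insert_insert_self,
            PySem.Dict.getD_of_not_contains d _ h]
      · simp [hc]

-- port A as a fold of pvStepA over the extracted pairs
theorem pvA_char (events : List (List (String × Option String))) (key_roles : List (String × String)) :
    get_per_key_endpoint_breakdown events key_roles
      = ((events.filterMap pvExtract).foldl pvStepA PySem.Dict.empty).items.map (fun p => (p.1, p.2.items)) := by
  unfold get_per_key_endpoint_breakdown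
  exact congrArg
    (fun d : PySem.Dict String (PySem.Dict String Int) => d.items.map (fun p => (p.1, p.2.items)))
    (Eq.trans
      (PySem.List.foldl_congr_mem events _ _ PySem.Dict.empty (fun d e _ => pv_stepA_match d e))
      (pv_foldl_extract pvStepA events PySem.Dict.empty))

-- B's pair list is the extracted-pair list
theorem pvB_pairs (events : List (List (String × Option String))) :
    (events.map (fun e => (((PySem.Dict.mk e).get? "key").getD none, ((PySem.Dict.mk e).get? "endpoint").getD none))).filterMap
        (fun p : Option String × Option String => match p.1 with
          | some k => match p.2 with
            | some ep => if k ≠ "" ∧ ep ≠ "" then some (k, ep) else none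
            | none => none
          | none => none)
      = events.filterMap pvExtract := by
  rw [List.filterMap_map]
  apply List.filterMap_congr
  intro e _
  simp only [Function.comp]
  unfold pvExtract
  cases ((PySem.Dict.mk e).get? "key").getD none with
  | none => rfl
  | some ks =>
    cases ((PySem.Dict.mk e).get? "endpoint").getD none with
    | none => rfl
    | some eps => rfl

-- counting an endpoint inside a key's group = counting the pair in the whole pair list
theorem pv_count_pair (ps : List (String × String)) (k ep : String) :
    ((ps.filter (fun p => p.1 == k)).map (·.2)).count ep = ps.count (k, ep) := by
  induction ps with
  | nil => rfl
  | cons p ps ih =>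
    simp only [List.filter_cons, List.count_cons]
    by_cases h : p.1 = k
    · by_cases h2 : p.2 = ep
      · have : p = (k, ep) := by cases p; simp_all
        simp [h, this, List.count_cons, ih]
      · have : p ≠ (k, ep) := by cases p; simp_all
        simp [h, h2, this, List.count_cons, ih]
    · have : p ≠ (k, ep) := by cases p; simp_all
      have hb : (p.1 == k) = false := by simp [h]
      simp [hb, this, ih]
  
-- value of A's fold at a key: the insert-counting fold over that key's endpoints
theorem pv_A_getD (ps : List (String × String)) (d : PySem.Dict String (PySem.Dict String Int)) (k : String) :
    (ps.foldl pvStepA d).getD k PySem.Dict.empty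
      = ((ps.filter (fun p => p.1 == k)).map (·.2)).foldl
          (fun c x => c.insert x (c.getD x 0 + 1)) (d.getD k PySem.Dict.empty) := by
  induction ps generalizing d with
  | nil => rfl
  | cons p ps ih =>
    simp only [List.foldl_cons, List.filter_cons]
    by_cases h : p.1 = k
    · subst h
      simp [ih, pvStepA, PySem.Dict.getD_insert_self]
    · have hb : (p.1 == k) = false := by simp [h]
      simp only [hb, Bool.false_eq_true, if_false, ih, pvStepA,
        PySem.Dict.getD_insert_of_ne d _ _ (Ne.symm h)]

-- ===== VERDICT (by name: the statement is the Claim_ definition above) =====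
theorem get_per_key_endpoint_breakdown_spec : Claim_equal_get_per_key_endpoint_breakdown := by
  intro events key_roles _
  unfold Spec_get_per_key_endpoint_breakdown
  rw [pvA_char events key_roles]
  simp only [get_per_key_endpoint_breakdown_alt]
  rw [pvB_pairs events]
  set ps := events.filterMap pvExtract with hps
  have hkA : ((ps.foldl pvStepA PySem.Dict.empty).keys) = PySem.Set.ofList (ps.map (·.1)) := by
    simpa [PySem.Set.update_nil_left] using
      (PySem.Dict.keys_foldl_insert_key ps (·.1)
        (fun d p => ((d.getD p.1 PySem.Dict.empty).insert p.2 ((d.getD p.1 PySem.Dict.empty).getD p.2 0 + 1)))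
        PySem.Dict.empty)
  have hndA : ((ps.foldl pvStepA PySem.Dict.empty).keys).Nodup := by
    rw [hkA]; exact PySem.Set.nodup_ofList _
  rw [PySem.Dict.items_eq_map_keys _ hndA PySem.Dict.empty, hkA, List.map_map,
      PySem.List.dedup_eq_ofList]
  apply List.map_congr_left
  intro k _
  simp only [Function.comp]
  rw [pv_A_getD, PySem.Dict.getD_empty,
      PySem.Dict.foldl_insert_getD_add_one_eq_counter, PySem.Dict.items_counter,
      PySem.List.dedup_eq_ofList]
  refine congrArg (Prod.mk k) ?_
  apply List.map_congr_left
  intro ep _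
  rw [pv_count_pair]
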